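-- pv_equiv track=rewrite | github.com/mitsuo0114/competitive_programming | python/atcoder/Beginner045/D.py | solve
-- ===== SOURCE A (Python) =====
-- from collections import Counter
--
-- def solve(H, W, N, ABs):
--     total = (H - 2) * (W - 2)
--     points = {}
--     for a, b in ABs:
--         a -= 1
--         b -= 1
--         for i in [-1, 0, 1]:
--             for j in [-1, 0, 1]:
--                 if 0 < a + i < H - 1 and 0 < b + j < W - 1:
--                     d = (a + i, b + j)
--                     if d not in points:
--                         points[d] = 0
--                     points[d] += 1
--     c = Counter([v for v in points.values()])
--     ans = [total - len(points)] + [c[f] if f in c else 0 for f in range(1, 10)]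
--     return "\n".join([str(a) for a in ans])
-- ===== SOURCE B (Python) =====
-- def solve(H, W, N, ABs):
--     total = (H - 2) * (W - 2)
--     cnt = {}
--     for a, b in ABs:
--         p = (a - 1, b - 1)
--         cnt[p] = cnt.get(p, 0) + 1
--     centers = set()
--     for (x, y) in cnt:
--         for i in (-1, 0, 1):
--             for j in (-1, 0, 1):
--                 if 0 < x + i < H - 1 and 0 < y + j < W - 1:
--                     centers.add((x + i, y + j))
--     hist = {}
--     for (x, y) in centers:
--         s = 0
--         for i in (-1, 0, 1):
--             for j in (-1, 0, 1):
--                 s += cnt.get((x + i, y + j), 0)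
--         hist[s] = hist.get(s, 0) + 1
--     lines = [total - len(centers)] + [hist.get(f, 0) for f in range(1, 10)]
--     return "\n".join(str(v) for v in lines)
-- ===== Notes on version B (the rewrite author's own statement) =====
-- stated objective: alternative
-- what changed: A scatters: each painted cell increments a dict entry at every valid 3x3 center around it, then counts the dict's values; B gathers: it builds a multiplicity map of painted cells once, collects the candidate centers near painted cells, and for each center sums the painted counts of its 3x3 neighbourhood, tallying a histogram.
import Mathlib
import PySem

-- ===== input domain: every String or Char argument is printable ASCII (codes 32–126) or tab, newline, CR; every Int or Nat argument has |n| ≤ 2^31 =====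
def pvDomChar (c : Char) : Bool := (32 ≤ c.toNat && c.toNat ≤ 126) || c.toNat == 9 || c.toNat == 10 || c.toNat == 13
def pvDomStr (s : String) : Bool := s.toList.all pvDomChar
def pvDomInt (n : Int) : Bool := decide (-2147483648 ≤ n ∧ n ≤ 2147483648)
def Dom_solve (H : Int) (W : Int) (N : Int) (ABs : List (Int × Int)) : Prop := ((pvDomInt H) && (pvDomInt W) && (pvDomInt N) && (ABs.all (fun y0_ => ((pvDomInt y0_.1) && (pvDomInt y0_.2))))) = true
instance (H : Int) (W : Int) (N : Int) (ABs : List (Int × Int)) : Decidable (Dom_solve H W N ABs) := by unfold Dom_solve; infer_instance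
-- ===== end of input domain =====

-- B replaces A's scatter (each painted cell increments every valid 3x3 center around it in a dict,
-- whose values are then counted) by a gather (a multiplicity map of painted cells, the set of candidate
-- centers near them, and per-center neighbourhood sums tallied into a histogram); same cost, alternative algorithm.

-- ===== PORT A =====
def pvOffs : List Int := [-1, 0, 1]

def solve (H : Int) (W : Int) (N : Int) (ABs : List (Int × Int)) : String :=
  let total := (H - 2) * (W - 2)
  let points : PySem.Dict (Int × Int) Int :=
    ABs.foldl (fun pts ab =>
      let a := ab.1 - 1
      let b := ab.2 - 1
      pvOffs.foldl (fun pts i =>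
        pvOffs.foldl (fun pts j =>
          if (0 < a + i ∧ a + i < H - 1) ∧ (0 < b + j ∧ b + j < W - 1) then
            let d := (a + i, b + j)
            let pts1 := if pts.contains d then pts else pts.insert d 0
            pts1.insert d (pts1.getD d 0 + 1)
          else pts) pts) pts) PySem.Dict.empty
  let c := PySem.Dict.counter points.values
  let ans : List Int :=
    (total - (points.size : Int)) ::
      (PySem.List.pyRange 1 10 1).map (fun f => if c.contains f then c.getD f 0 else 0)
  PySem.Str.join "\n" (ans.map PySem.Int.toStr)

-- ===== PORT B =====
def solve_alt (H : Int) (W : Int) (N : Int) (ABs : List (Int × Int)) : String :=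
  let total := (H - 2) * (W - 2)
  let cnt : PySem.Dict (Int × Int) Int :=
    ABs.foldl (fun d ab =>
      let p := (ab.1 - 1, ab.2 - 1)
      d.insert p (d.getD p 0 + 1)) PySem.Dict.empty
  let centers : PySem.Set (Int × Int) :=
    cnt.keys.foldl (fun s xy =>
      pvOffs.foldl (fun s i =>
        pvOffs.foldl (fun s j =>
          if (0 < xy.1 + i ∧ xy.1 + i < H - 1) ∧ (0 < xy.2 + j ∧ xy.2 + j < W - 1) then
            PySem.Set.add s (xy.1 + i, xy.2 + j)
          else s) s) s) PySem.Set.empty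
  let hist : PySem.Dict Int Int :=
    centers.foldl (fun h xy =>
      let s := pvOffs.foldl (fun s i =>
        pvOffs.foldl (fun s j => s + cnt.getD (xy.1 + i, xy.2 + j) 0) s) (0 : Int)
      h.insert s (h.getD s 0 + 1)) PySem.Dict.empty
  let lines : List Int :=
    (total - PySem.Set.len centers) ::
      (PySem.List.pyRange 1 10 1).map (fun f => hist.getD f 0)
  PySem.Str.join "\n" (lines.map PySem.Int.toStr)

-- ===== PRECONDITION & SPEC =====
def Spec_solve (H : Int) (W : Int) (N : Int) (ABs : List (Int × Int)) (out : String) : Prop := out = solve_alt H W N ABs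
instance (H : Int) (W : Int) (N : Int) (ABs : List (Int × Int)) (out : String) : Decidable (Spec_solve H W N ABs out) := by unfold Spec_solve; infer_instance

-- ===== CLAIM (what is proved, stated in full; the proofs are below) =====
def Claim_equal_solve : Prop := ∀ (H : Int) (W : Int) (N : Int) (ABs : List (Int × Int)), Dom_solve H W N ABs → Spec_solve H W N ABs (solve H W N ABs)

-- ===== LEMMAS AND PROOFS =====

-- proof-side names for the loops of the two ports (each is definitionally the port's loop)
abbrev pvValid (H W : Int) (d : Int × Int) : Prop :=
  (0 < d.1 ∧ d.1 < H - 1) ∧ (0 < d.2 ∧ d.2 < W - 1)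

def pvNearB (e ab : Int × Int) : Bool :=
  decide ((ab.1 - 2 ≤ e.1 ∧ e.1 ≤ ab.1) ∧ (ab.2 - 2 ≤ e.2 ∧ e.2 ≤ ab.2))

def pvShift (ab : Int × Int) : Int × Int := (ab.1 - 1, ab.2 - 1)

def pvNbl (a b : Int) : List (Int × Int) :=
  pvOffs.flatMap (fun i => pvOffs.map (fun j => (a + i, b + j)))

def pvUpd (pts : PySem.Dict (Int × Int) Int) (d : Int × Int) : PySem.Dict (Int × Int) Int :=
  let pts1 := if pts.contains d then pts else pts.insert d 0
  pts1.insert d (pts1.getD d 0 + 1)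

def pvCondUpd (H W : Int) (pts : PySem.Dict (Int × Int) Int) (L : List (Int × Int)) :
    PySem.Dict (Int × Int) Int :=
  L.foldl (fun pts d =>
    if (0 < d.1 ∧ d.1 < H - 1) ∧ (0 < d.2 ∧ d.2 < W - 1) then pvUpd pts d else pts) pts

def pvFoldA (H W : Int) (ABs : List (Int × Int)) (pts : PySem.Dict (Int × Int) Int) :
    PySem.Dict (Int × Int) Int :=
  ABs.foldl (fun pts ab => pvCondUpd H W pts (pvNbl (ab.1 - 1) (ab.2 - 1))) pts

def pvCondAdd (H W : Int) (s : PySem.Set (Int × Int)) (L : List (Int × Int)) : PySem.Set (Int × Int) :=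
  L.foldl (fun s d =>
    if (0 < d.1 ∧ d.1 < H - 1) ∧ (0 < d.2 ∧ d.2 < W - 1) then PySem.Set.add s d else s) s

def pvCenters (H W : Int) (K : List (Int × Int)) : PySem.Set (Int × Int) :=
  K.foldl (fun s xy => pvCondAdd H W s (pvNbl xy.1 xy.2)) PySem.Set.empty

def pvSVal (cnt : PySem.Dict (Int × Int) Int) (xy : Int × Int) : Int :=
  (pvNbl xy.1 xy.2).foldl (fun acc d => acc + cnt.getD d 0) 0

def pvHistP (cnt : PySem.Dict (Int × Int) Int) (centers : List (Int × Int)) :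
    PySem.Dict Int Int :=
  centers.foldl (fun h xy => h.insert (pvSVal cnt xy) (h.getD (pvSVal cnt xy) 0 + 1))
    PySem.Dict.empty

lemma solve_eq (H W N : Int) (ABs : List (Int × Int)) :
    solve H W N ABs =
      PySem.Str.join "\n"
        ((((H - 2) * (W - 2) - ((pvFoldA H W ABs PySem.Dict.empty).size : Int)) ::
            (PySem.List.pyRange 1 10 1).map (fun f =>
              if (PySem.Dict.counter (pvFoldA H W ABs PySem.Dict.empty).values).contains f then
                (PySem.Dict.counter (pvFoldA H W ABs PySem.Dict.empty).values).getD f 0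
              else 0)).map PySem.Int.toStr) := rfl

lemma pvFoldB_counter (ABs : List (Int × Int)) :
    (ABs.foldl (fun d ab => d.insert (ab.1 - 1, ab.2 - 1)
        (d.getD (ab.1 - 1, ab.2 - 1) 0 + 1)) PySem.Dict.empty) =
      PySem.Dict.counter (ABs.map pvShift) := by
  rw [← PySem.Dict.foldl_insert_getD_add_one_eq_counter (ABs.map pvShift), List.foldl_map]
  rfl

lemma pvHistP_map (cnt : PySem.Dict (Int × Int) Int) (centers : List (Int × Int)) :
    pvHistP cnt centers =
      (centers.map (pvSVal cnt)).foldl (fun h x => h.insert x (h.getD x 0 + 1))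
        PySem.Dict.empty := by
  unfold pvHistP
  exact (List.foldl_map (f := pvSVal cnt)
    (g := fun (h : PySem.Dict Int Int) (x : Int) => h.insert x (h.getD x 0 + 1))
    (l := centers) (init := PySem.Dict.empty)).symm

set_option maxHeartbeats 2000000 in
lemma solve_alt_eq (H W N : Int) (ABs : List (Int × Int)) :
    solve_alt H W N ABs =
      PySem.Str.join "\n"
        ((((H - 2) * (W - 2) -
              PySem.Set.len (pvCenters H W (PySem.Dict.counter (ABs.map pvShift)).keys)) ::
            (PySem.List.pyRange 1 10 1).map (fun f =>
              (pvHistP (PySem.Dict.counter (ABs.map pvShift))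
                  (pvCenters H W (PySem.Dict.counter (ABs.map pvShift)).keys)).getD f 0)).map
          PySem.Int.toStr) := by
  simp only [solve_alt]
  simp only [pvFoldB_counter]
  rfl

lemma pvNbl_mem (a b : Int) (e : Int × Int) :
    e ∈ pvNbl a b ↔ (a - 1 ≤ e.1 ∧ e.1 ≤ a + 1 ∧ b - 1 ≤ e.2 ∧ e.2 ≤ b + 1) := by
  obtain ⟨x, y⟩ := e
  simp [pvNbl, pvOffs, Prod.ext_iff]
  omega

lemma pvNbl_nodup (a b : Int) : (pvNbl a b).Nodup := by
  simp [pvNbl, pvOffs, Prod.ext_iff]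

lemma pvUpd_getD (pts : PySem.Dict (Int × Int) Int) (d e : Int × Int) :
    (pvUpd pts d).getD e 0 = if e = d then pts.getD d 0 + 1 else pts.getD e 0 := by
  unfold pvUpd
  by_cases hc : pts.contains d
  · simp [hc, PySem.Dict.getD_insert]
  · simp only [Bool.not_eq_true] at hc
    simp [hc, PySem.Dict.getD_insert, PySem.Dict.getD_of_not_contains pts 0 hc]
    split_ifs <;> rfl

lemma pvUpd_mem_keys (pts : PySem.Dict (Int × Int) Int) (d e : Int × Int) :
    e ∈ (pvUpd pts d).keys ↔ e = d ∨ e ∈ pts.keys := by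
  unfold pvUpd
  by_cases hc : pts.contains d <;>
    simp [hc, PySem.Dict.mem_keys_insert] <;> try tauto

lemma pvUpd_nodup (pts : PySem.Dict (Int × Int) Int) (d : Int × Int)
    (h : pts.keys.Nodup) : (pvUpd pts d).keys.Nodup := by
  unfold pvUpd
  by_cases hc : pts.contains d <;>
    simp [hc] <;> exact PySem.Dict.nodup_keys_insert _ _ _ (by first | exact h | exact PySem.Dict.nodup_keys_insert _ _ _ h)

lemma pvCondUpd_getD (H W : Int) (L : List (Int × Int)) (hL : L.Nodup) :
    ∀ (pts : PySem.Dict (Int × Int) Int) (e : Int × Int),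
      (pvCondUpd H W pts L).getD e 0 =
        pts.getD e 0 + (if pvValid H W e ∧ e ∈ L then 1 else 0) := by
  induction L with
  | nil => intro pts e; simp [pvCondUpd]
  | cons d L ih =>
    intro pts e
    obtain ⟨hd, hL'⟩ := List.nodup_cons.mp hL
    have step : pvCondUpd H W pts (d :: L) =
        pvCondUpd H W (if (0 < d.1 ∧ d.1 < H - 1) ∧ (0 < d.2 ∧ d.2 < W - 1) then pvUpd pts d else pts) L := rfl
    rw [step, ih hL']
    by_cases hv : (0 < d.1 ∧ d.1 < H - 1) ∧ (0 < d.2 ∧ d.2 < W - 1)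
    · simp only [if_pos hv, pvUpd_getD]
      by_cases hed : e = d
      · subst hed
        simp [hd, pvValid, hv]
      · simp only [if_neg hed, List.mem_cons, hed, false_or]
        rfl
    · simp only [if_neg hv]
      by_cases hed : e = d
      · subst hed
        have : ¬ (pvValid H W e) := by simpa [pvValid] using hv
        simp [this, List.mem_cons]
      · simp [List.mem_cons, hed]

lemma pvCondUpd_mem (H W : Int) (L : List (Int × Int)) :
    ∀ (pts : PySem.Dict (Int × Int) Int) (e : Int × Int),
      e ∈ (pvCondUpd H W pts L).keys ↔ e ∈ pts.keys ∨ (pvValid H W e ∧ e ∈ L) := by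
  induction L with
  | nil => intro pts e; simp [pvCondUpd]
  | cons d L ih =>
    intro pts e
    have step : pvCondUpd H W pts (d :: L) =
        pvCondUpd H W (if (0 < d.1 ∧ d.1 < H - 1) ∧ (0 < d.2 ∧ d.2 < W - 1) then pvUpd pts d else pts) L := rfl
    rw [step, ih]
    by_cases hv : (0 < d.1 ∧ d.1 < H - 1) ∧ (0 < d.2 ∧ d.2 < W - 1)
    · simp only [if_pos hv, pvUpd_mem_keys, List.mem_cons]
      constructor
      · rintro ((rfl | h) | h)
        · exact Or.inr ⟨hv, Or.inl rfl⟩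
        · exact Or.inl h
        · exact Or.inr ⟨h.1, Or.inr h.2⟩
      · rintro (h | ⟨hval, (rfl | h)⟩)
        · exact Or.inl (Or.inr h)
        · exact Or.inl (Or.inl rfl)
        · exact Or.inr ⟨hval, h⟩
    · simp only [if_neg hv, List.mem_cons]
      constructor
      · rintro (h | h)
        · exact Or.inl h
        · exact Or.inr ⟨h.1, Or.inr h.2⟩
      · rintro (h | ⟨hval, (rfl | h)⟩)
        · exact Or.inl h
        · exact absurd hval hv
        · exact Or.inr ⟨hval, h⟩

lemma pvCondUpd_nodup (H W : Int) (L : List (Int × Int)) :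
    ∀ (pts : PySem.Dict (Int × Int) Int), pts.keys.Nodup → (pvCondUpd H W pts L).keys.Nodup := by
  induction L with
  | nil => intro pts h; exact h
  | cons d L ih =>
    intro pts h
    have step : pvCondUpd H W pts (d :: L) =
        pvCondUpd H W (if (0 < d.1 ∧ d.1 < H - 1) ∧ (0 < d.2 ∧ d.2 < W - 1) then pvUpd pts d else pts) L := rfl
    rw [step]
    apply ih
    by_cases hv : (0 < d.1 ∧ d.1 < H - 1) ∧ (0 < d.2 ∧ d.2 < W - 1)
    · simpa [hv] using pvUpd_nodup pts d h
    · simpa [hv] using h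

lemma pvNbl_mem_shift (ab e : Int × Int) :
    e ∈ pvNbl (ab.1 - 1) (ab.2 - 1) ↔ pvNearB e ab = true := by
  rw [pvNbl_mem]
  simp [pvNearB]
  omega

lemma pvFoldA_getD (H W : Int) (ABs : List (Int × Int)) :
    ∀ (pts : PySem.Dict (Int × Int) Int) (e : Int × Int),
      (pvFoldA H W ABs pts).getD e 0 =
        pts.getD e 0 + (if pvValid H W e then (ABs.countP (pvNearB e) : Int) else 0) := by
  induction ABs with
  | nil => intro pts e; simp [pvFoldA]
  | cons ab ABs ih =>
    intro pts e
    have step : pvFoldA H W (ab :: ABs) pts =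
        pvFoldA H W ABs (pvCondUpd H W pts (pvNbl (ab.1 - 1) (ab.2 - 1))) := rfl
    rw [step, ih, pvCondUpd_getD H W _ (pvNbl_nodup _ _), List.countP_cons]
    by_cases hv : pvValid H W e
    · by_cases hn : pvNearB e ab = true
      · rw [if_pos ⟨hv, (pvNbl_mem_shift ab e).mpr hn⟩, if_pos hv, if_pos hv, if_pos hn]
        push_cast
        ring
      · have hm : ¬ (pvValid H W e ∧ e ∈ pvNbl (ab.1 - 1) (ab.2 - 1)) := by
          rintro ⟨-, h⟩; exact hn ((pvNbl_mem_shift ab e).mp h)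
        rw [if_neg hm, if_pos hv, if_pos hv, if_neg hn]
        push_cast
        ring
    · have hm : ¬ (pvValid H W e ∧ e ∈ pvNbl (ab.1 - 1) (ab.2 - 1)) := fun h => hv h.1
      rw [if_neg hm, if_neg hv, if_neg hv]
      ring

lemma pvFoldA_mem (H W : Int) (ABs : List (Int × Int)) :
    ∀ (pts : PySem.Dict (Int × Int) Int) (e : Int × Int),
      e ∈ (pvFoldA H W ABs pts).keys ↔
        e ∈ pts.keys ∨ (pvValid H W e ∧ ∃ ab ∈ ABs, pvNearB e ab = true) := by
  induction ABs with
  | nil => intro pts e; simp [pvFoldA]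
  | cons ab ABs ih =>
    intro pts e
    have step : pvFoldA H W (ab :: ABs) pts =
        pvFoldA H W ABs (pvCondUpd H W pts (pvNbl (ab.1 - 1) (ab.2 - 1))) := rfl
    rw [step, ih, pvCondUpd_mem]
    simp only [pvNbl_mem_shift, List.mem_cons]
    constructor
    · rintro ((h | h) | ⟨hval, ab', hab', hn⟩)
      · exact Or.inl h
      · exact Or.inr ⟨h.1, ab, Or.inl rfl, h.2⟩
      · exact Or.inr ⟨hval, ab', Or.inr hab', hn⟩
    · rintro (h | ⟨hval, ab', (rfl | hab'), hn⟩)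
      · exact Or.inl (Or.inl h)
      · exact Or.inl (Or.inr ⟨hval, hn⟩)
      · exact Or.inr ⟨hval, ab', hab', hn⟩

lemma pvFoldA_nodup (H W : Int) (ABs : List (Int × Int)) :
    ∀ (pts : PySem.Dict (Int × Int) Int), pts.keys.Nodup → (pvFoldA H W ABs pts).keys.Nodup := by
  induction ABs with
  | nil => intro pts h; exact h
  | cons ab ABs ih =>
    intro pts h
    exact ih _ (pvCondUpd_nodup H W _ pts h)

lemma pvCondAdd_mem (H W : Int) (L : List (Int × Int)) :
    ∀ (s : PySem.Set (Int × Int)) (e : Int × Int),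
      e ∈ pvCondAdd H W s L ↔ e ∈ s ∨ (pvValid H W e ∧ e ∈ L) := by
  induction L with
  | nil => intro s e; simp [pvCondAdd]
  | cons d L ih =>
    intro s e
    have step : pvCondAdd H W s (d :: L) =
        pvCondAdd H W (if (0 < d.1 ∧ d.1 < H - 1) ∧ (0 < d.2 ∧ d.2 < W - 1) then PySem.Set.add s d else s) L := rfl
    rw [step, ih]
    by_cases hv : (0 < d.1 ∧ d.1 < H - 1) ∧ (0 < d.2 ∧ d.2 < W - 1)
    · simp only [if_pos hv, PySem.Set.mem_add, List.mem_cons]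
      constructor
      · rintro ((h | rfl) | h)
        · exact Or.inl h
        · exact Or.inr ⟨hv, Or.inl rfl⟩
        · exact Or.inr ⟨h.1, Or.inr h.2⟩
      · rintro (h | ⟨hval, (rfl | h)⟩)
        · exact Or.inl (Or.inl h)
        · exact Or.inl (Or.inr rfl)
        · exact Or.inr ⟨hval, h⟩
    · simp only [if_neg hv, List.mem_cons]
      constructor
      · rintro (h | h)
        · exact Or.inl h
        · exact Or.inr ⟨h.1, Or.inr h.2⟩
      · rintro (h | ⟨hval, (rfl | h)⟩)
        · exact Or.inl h
        · exact absurd hval hv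
        · exact Or.inr ⟨hval, h⟩

lemma pvCondAdd_nodup (H W : Int) (L : List (Int × Int)) :
    ∀ (s : PySem.Set (Int × Int)), s.Nodup → (pvCondAdd H W s L).Nodup := by
  induction L with
  | nil => intro s h; exact h
  | cons d L ih =>
    intro s h
    have step : pvCondAdd H W s (d :: L) =
        pvCondAdd H W (if (0 < d.1 ∧ d.1 < H - 1) ∧ (0 < d.2 ∧ d.2 < W - 1) then PySem.Set.add s d else s) L := rfl
    rw [step]
    apply ih
    by_cases hv : (0 < d.1 ∧ d.1 < H - 1) ∧ (0 < d.2 ∧ d.2 < W - 1)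
    · simpa [hv] using PySem.Set.nodup_add s d h
    · simpa [hv] using h

lemma pvCenters_mem (H W : Int) (K : List (Int × Int)) (e : Int × Int) :
    e ∈ pvCenters H W K ↔ ∃ xy ∈ K, pvValid H W e ∧ e ∈ pvNbl xy.1 xy.2 := by
  unfold pvCenters
  suffices h : ∀ (s : PySem.Set (Int × Int)),
      e ∈ K.foldl (fun s xy => pvCondAdd H W s (pvNbl xy.1 xy.2)) s ↔
        e ∈ s ∨ ∃ xy ∈ K, pvValid H W e ∧ e ∈ pvNbl xy.1 xy.2 by
    simpa [PySem.Set.empty] using h PySem.Set.empty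
  induction K with
  | nil => intro s; simp
  | cons xy K ih =>
    intro s
    simp only [List.foldl_cons, ih, pvCondAdd_mem, List.mem_cons]
    constructor
    · rintro ((h | h) | ⟨xy', hxy', h⟩)
      · exact Or.inl h
      · exact Or.inr ⟨xy, Or.inl rfl, h⟩
      · exact Or.inr ⟨xy', Or.inr hxy', h⟩
    · rintro (h | ⟨xy', (rfl | hxy'), h⟩)
      · exact Or.inl (Or.inl h)
      · exact Or.inl (Or.inr h)
      · exact Or.inr ⟨xy', hxy', h⟩

lemma pvCenters_nodup (H W : Int) (K : List (Int × Int)) : (pvCenters H W K).Nodup := by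
  unfold pvCenters
  suffices h : ∀ (s : PySem.Set (Int × Int)), s.Nodup →
      (K.foldl (fun s xy => pvCondAdd H W s (pvNbl xy.1 xy.2)) s).Nodup by
    exact h PySem.Set.empty (by simp [PySem.Set.empty])
  induction K with
  | nil => intro s h; exact h
  | cons xy K ih =>
    intro s h
    exact ih _ (pvCondAdd_nodup H W _ s h)

-- both key collections have the same members, hence are a permutation of each other
lemma pvKeys_perm (H W : Int) (ABs : List (Int × Int)) :
    (pvFoldA H W ABs PySem.Dict.empty).keys.Perm
      (pvCenters H W (PySem.Dict.counter (ABs.map pvShift)).keys) := by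
  rw [List.perm_ext_iff_of_nodup
    (pvFoldA_nodup H W ABs _ (by simp [PySem.Dict.nodup_keys_empty]))
    (pvCenters_nodup H W _)]
  intro e
  rw [pvFoldA_mem, pvCenters_mem]
  simp only [PySem.Dict.keys_counter, PySem.Set.mem_ofList, List.mem_map,
    PySem.Dict.keys_empty, List.not_mem_nil, false_or]
  constructor
  · rintro ⟨hval, ab, hab, hn⟩
    exact ⟨pvShift ab, ⟨ab, hab, rfl⟩, hval, by
      simpa [pvShift] using (pvNbl_mem_shift ab e).mpr hn⟩
  · rintro ⟨xy, ⟨ab, hab, rfl⟩, hval, hmem⟩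
    exact ⟨hval, ab, hab, (pvNbl_mem_shift ab e).mp (by simpa [pvShift] using hmem)⟩

-- summing counts over a duplicate-free list of cells counts membership
lemma pvCountP_mem_cons {α : Type} [BEq α] [LawfulBEq α] (xs : List α) (d : α) (L : List α)
    (hd : d ∉ L) :
    xs.countP (fun x => (d :: L).contains x) =
      xs.count d + xs.countP (fun x => L.contains x) := by
  induction xs with
  | nil => simp
  | cons x xs ih =>
    simp only [List.countP_cons, List.count_cons, ih]
    by_cases hx : x = d
    · subst hx
      simp [hd]
      omega
    · by_cases hxL : x ∈ L <;> simp [List.contains_cons, hx, hxL] <;> omega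

lemma pvSum_counts {α : Type} [BEq α] [LawfulBEq α] (xs : List α) (L : List α) (hL : L.Nodup) :
    ∀ (c : Int), L.foldl (fun acc d => acc + (xs.count d : Int)) c =
      c + (xs.countP (fun x => L.contains x) : Int) := by
  induction L with
  | nil => intro c; simp
  | cons d L ih =>
    intro c
    obtain ⟨hd, hL'⟩ := List.nodup_cons.mp hL
    simp only [List.foldl_cons, ih hL', pvCountP_mem_cons xs d L hd]
    push_cast
    ring

lemma pvSVal_eq (ABs : List (Int × Int)) (e : Int × Int) :
    pvSVal (PySem.Dict.counter (ABs.map pvShift)) e = (ABs.countP (pvNearB e) : Int) := by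
  unfold pvSVal
  simp only [PySem.Dict.getD_counter]
  rw [pvSum_counts _ _ (pvNbl_nodup e.1 e.2) 0, List.countP_map]
  rw [show ((fun x => (pvNbl e.1 e.2).contains x) ∘ pvShift) = pvNearB e from ?_]
  · ring
  · funext ab
    simp only [Function.comp_apply, pvNearB]
    rw [show (pvNbl e.1 e.2).contains (pvShift ab) = decide (pvShift ab ∈ pvNbl e.1 e.2) from by
      simp]
    rw [decide_eq_decide, pvNbl_mem]
    simp [pvShift]
    omega

-- the histogram's entry at f counts centers whose neighbourhood sum is f
lemma pvHistP_getD (centers : List (Int × Int)) (cnt : PySem.Dict (Int × Int) Int) (f : Int) :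
    (pvHistP cnt centers).getD f 0 =
      (centers.countP (fun c => pvSVal cnt c == f) : Int) := by
  rw [pvHistP_map, PySem.Dict.getD_foldl_insert_add_one]
  simp [List.count, List.countP_map, Function.comp_def]

-- A's reported entry at f is the number of dict values equal to f
lemma pvEntryA (points : PySem.Dict (Int × Int) Int) (f : Int) :
    (if (PySem.Dict.counter points.values).contains f then
        (PySem.Dict.counter points.values).getD f 0
      else 0) = (points.values.count f : Int) := by
  by_cases hc : (PySem.Dict.counter points.values).contains f
  · simp [hc, PySem.Dict.getD_counter]
  · have : f ∉ points.values := by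
      intro hmem
      apply hc
      rw [PySem.Dict.contains_counter]
      simpa using hmem
    simp [hc, List.count_eq_zero.mpr this]

-- the two reported lines agree for every f
lemma pvLines_agree (H W : Int) (ABs : List (Int × Int)) (f : Int) :
    ((pvFoldA H W ABs PySem.Dict.empty).values.count f : Int) =
      ((pvCenters H W (PySem.Dict.counter (ABs.map pvShift)).keys).countP
          (fun c => pvSVal (PySem.Dict.counter (ABs.map pvShift)) c == f) : Int) := by
  have hnodup : (pvFoldA H W ABs PySem.Dict.empty).keys.Nodup :=
    pvFoldA_nodup H W ABs _ (by simp [PySem.Dict.nodup_keys_empty])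
  rw [PySem.Dict.values_eq_map_keys _ hnodup 0]
  rw [show (List.count f (List.map (fun k => (pvFoldA H W ABs PySem.Dict.empty).getD k 0)
      (pvFoldA H W ABs PySem.Dict.empty).keys)) =
      List.countP ((fun v => v == f) ∘ (fun k => (pvFoldA H W ABs PySem.Dict.empty).getD k 0))
        (pvFoldA H W ABs PySem.Dict.empty).keys from by
    rw [← List.countP_map]; rfl]
  have hcong : List.countP ((fun v => v == f) ∘ (fun k => (pvFoldA H W ABs PySem.Dict.empty).getD k 0))
      (pvFoldA H W ABs PySem.Dict.empty).keys =
      List.countP (fun k => ((ABs.countP (pvNearB k) : Int) == f))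
        (pvFoldA H W ABs PySem.Dict.empty).keys := by
    apply List.countP_congr
    intro k hk
    have hval : pvValid H W k := by
      rcases (pvFoldA_mem H W ABs _ k).mp hk with h | h
      · simp [PySem.Dict.keys_empty] at h
      · exact h.1
    simp only [Function.comp_apply, pvFoldA_getD, PySem.Dict.getD_empty, if_pos hval,
      zero_add]
  rw [hcong]
  rw [(pvKeys_perm H W ABs).countP_eq]
  congr 1
  apply List.countP_congr
  intro c _
  rw [pvSVal_eq]

theorem pv_main (H W N : Int) (ABs : List (Int × Int)) :
    solve H W N ABs = solve_alt H W N ABs := by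
  rw [solve_eq, solve_alt_eq]
  have hperm := pvKeys_perm H W ABs
  have hlen : ((pvFoldA H W ABs PySem.Dict.empty).size : Int) =
      PySem.Set.len (pvCenters H W (PySem.Dict.counter (ABs.map pvShift)).keys) := by
    have h := hperm.length_eq
    simp only [PySem.Dict.keys, List.length_map] at h
    simp [PySem.Set.len, PySem.Dict.size, ← h, PySem.Dict.keys]
  rw [hlen]
  congr 1
  congr 1
  congr 1
  apply List.map_congr_left
  intro f _
  rw [pvEntryA, pvHistP_getD]
  exact pvLines_agree H W ABs f

-- ===== VERDICT (by name: the statement is the Claim_ definition above) =====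
theorem solve_spec : Claim_equal_solve := by
  intro H W N ABs _
  unfold Spec_solve
  exact pv_main H W N ABs
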